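-- pv_equiv track=rewrite | github.com/otakuch/transitions-ia.fr | pipeline/collect_rome.py | build_metiers_list
-- ===== SOURCE A (Python) =====
-- GRANDS_DOMAINES = {
--     "A": "Agriculture et Pêche",
--     "B": "Arts et Façonnage d'Ouvrages d'Art",
--     "C": "Banque, Assurance, Immobilier",
--     "D": "Commerce, Vente et Grande Distribution",
--     "E": "Communication, Média et Multimédia",
--     "F": "Construction, Bâtiment et Travaux Publics",
--     "G": "Hôtellerie-Restauration, Tourisme et Loisirs",
--     "H": "Industrie",
--     "I": "Installation et Maintenance",
--     "J": "Santé",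
--     "K": "Services à la Personne et à la Collectivité",
--     "L": "Spectacle",
--     "M": "Support à l'Entreprise",
--     "N": "Transport et Logistique",
-- }
--
-- def build_metiers_list(arborescence_rows: list[dict]) -> list[dict]:
--     """
--     Construit la liste des métiers depuis l'arborescence ROME.
--
--     Structure de arborescence_principale_v4_utf8.csv :
--       code_rome | libelle_rome | code_domaine_professionnel | libelle_domaine | code_grand_domaine
--     """
--     metiers = []
--     seen = set()
--
--     for row in arborescence_rows:
--         code = row.get("code_rome", "").strip()
--         if not code or code in seen:
--             continue
--         seen.add(code)
--
--         grand_domaine_code = code[0].upper() if code else "?"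
--         libelle = row.get("libelle_rome", row.get("libelle", "")).strip()
--         domaine = row.get("libelle_domaine_professionnel", row.get("libelle_domaine", "")).strip()
--         code_domaine = row.get("code_domaine_professionnel", row.get("code_domaine", "")).strip()
--
--         # Génère un slug à partir du code ROME (ex: A1101 → a1101)
--         slug = code.lower().replace(" ", "-")
--
--         metiers.append({
--             "code_rome": code,
--             "libelle": libelle,
--             "slug": slug,
--             "grand_domaine_code": grand_domaine_code,
--             "grand_domaine": GRANDS_DOMAINES.get(grand_domaine_code, "Autre"),
--             "domaine": domaine,
--             "code_domaine": code_domaine,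
--             "url_rome": f"https://candidat.francetravail.fr/metierscope/fiche-metier/{code}",
--         })
--
--     metiers.sort(key=lambda x: x["code_rome"])
--     return metiers
-- ===== SOURCE B (Python) =====
-- GRANDS_DOMAINES = {
--     "A": "Agriculture et Pêche",
--     "B": "Arts et Façonnage d'Ouvrages d'Art",
--     "C": "Banque, Assurance, Immobilier",
--     "D": "Commerce, Vente et Grande Distribution",
--     "E": "Communication, Média et Multimédia",
--     "F": "Construction, Bâtiment et Travaux Publics",
--     "G": "Hôtellerie-Restauration, Tourisme et Loisirs",
--     "H": "Industrie",
--     "I": "Installation et Maintenance",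
--     "J": "Santé",
--     "K": "Services à la Personne et à la Collectivité",
--     "L": "Spectacle",
--     "M": "Support à l'Entreprise",
--     "N": "Transport et Logistique",
-- }
--
--
-- def _field(row: dict, k1: str, k2: str) -> str:
--     """First-of-two-keys lookup, stripped."""
--     v = row.get(k1)
--     if v is None:
--         v = row.get(k2, "")
--     return v.strip()
--
--
-- def _metier(code: str, row: dict) -> dict:
--     gdc = code[:1].upper() or "?"
--     return {
--         "code_rome": code,
--         "libelle": _field(row, "libelle_rome", "libelle"),
--         "slug": code.lower().replace(" ", "-"),
--         "grand_domaine_code": gdc,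
--         "grand_domaine": GRANDS_DOMAINES.get(gdc, "Autre"),
--         "domaine": _field(row, "libelle_domaine_professionnel", "libelle_domaine"),
--         "code_domaine": _field(row, "code_domaine_professionnel", "code_domaine"),
--         "url_rome": f"https://candidat.francetravail.fr/metierscope/fiche-metier/{code}",
--     }
--
--
-- def _keyed(rows: list) -> list:
--     """(stripped code, row) for every row whose stripped code_rome is non-empty."""
--     keyed = []
--     for row in rows:
--         code = row.get("code_rome", "").strip()
--         if code:
--             keyed.append((code, row))
--     return keyed
--
--
-- def build_metiers_list(arborescence_rows: list[dict]) -> list[dict]: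
--     # Sort-first strategy: stable-sort the non-empty (code, row) pairs by code,
--     # then emit one metier per consecutive run of equal codes; stability makes
--     # the first row in input order win each run, as A's seen-set does.
--     keyed = _keyed(arborescence_rows)
--     keyed.sort(key=lambda p: p[0])
--     out = []
--     prev = None
--     for code, row in keyed:
--         if prev is None or code != prev:
--             out.append(_metier(code, row))
--             prev = code
--     return out
-- ===== Notes on version B (the rewrite author's own statement) =====
-- stated objective: alternative
-- what changed: A dedups while streaming the input with a seen-set and sorts the built dicts at the end; B filters the (stripped code, row) pairs, stable-sorts them by code first, then a consecutive-run pass keeping only the previous code emits one metier per group (stability makes the first input row win each group), so the seen-set disappears.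
import Mathlib
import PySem

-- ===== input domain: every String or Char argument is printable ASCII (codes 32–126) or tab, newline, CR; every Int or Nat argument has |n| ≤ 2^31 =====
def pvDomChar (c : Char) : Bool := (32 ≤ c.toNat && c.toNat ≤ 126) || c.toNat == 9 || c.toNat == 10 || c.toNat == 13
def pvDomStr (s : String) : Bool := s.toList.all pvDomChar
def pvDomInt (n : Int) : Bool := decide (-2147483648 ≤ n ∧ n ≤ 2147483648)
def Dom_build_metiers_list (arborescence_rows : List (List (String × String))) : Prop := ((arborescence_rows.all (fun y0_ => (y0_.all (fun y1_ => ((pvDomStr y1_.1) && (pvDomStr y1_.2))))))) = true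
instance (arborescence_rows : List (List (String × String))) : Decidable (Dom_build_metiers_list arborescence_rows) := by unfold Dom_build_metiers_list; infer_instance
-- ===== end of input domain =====

-- B replaces A's seen-set dedup followed by a final sort with a filter pass, a
-- stable sort by code first, and a consecutive-run dedup that only remembers the
-- previously kept code (objective: alternative decomposition, same cost).

-- shared module constant GRANDS_DOMAINES (both Pythons read it)
def pvGrandsDomaines : List (String × String) :=
  [("A", "Agriculture et Pêche"),
   ("B", "Arts et Façonnage d'Ouvrages d'Art"),
   ("C", "Banque, Assurance, Immobilier"),
   ("D", "Commerce, Vente et Grande Distribution"),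
   ("E", "Communication, Média et Multimédia"),
   ("F", "Construction, Bâtiment et Travaux Publics"),
   ("G", "Hôtellerie-Restauration, Tourisme et Loisirs"),
   ("H", "Industrie"),
   ("I", "Installation et Maintenance"),
   ("J", "Santé"),
   ("K", "Services à la Personne et à la Collectivité"),
   ("L", "Spectacle"),
   ("M", "Support à l'Entreprise"),
   ("N", "Transport et Logistique")]

-- ===== PORT A =====
-- A-side helpers: row.get("code_rome", "").strip() and the inline dict literal
def pvRowCode (row : List (String × String)) : String :=
  PySem.Str.strip ((List.lookup "code_rome" row).getD "")

def pvMkMetier (code : String) (row : List (String × String)) : List (String × String) :=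
  let gdc := if code = "" then "?"
             else String.singleton (PySem.Chars.upperChar ((PySem.Str.pyGet? code 0).getD ' '))
  [("code_rome", code),
   ("libelle", PySem.Str.strip ((List.lookup "libelle_rome" row).getD ((List.lookup "libelle" row).getD ""))),
   ("slug", PySem.Str.replace (PySem.Str.lower code) " " "-"),
   ("grand_domaine_code", gdc),
   ("grand_domaine", (List.lookup gdc pvGrandsDomaines).getD "Autre"),
   ("domaine", PySem.Str.strip ((List.lookup "libelle_domaine_professionnel" row).getD ((List.lookup "libelle_domaine" row).getD ""))),
   ("code_domaine", PySem.Str.strip ((List.lookup "code_domaine_professionnel" row).getD ((List.lookup "code_domaine" row).getD ""))),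
   ("url_rome", "https://candidat.francetravail.fr/metierscope/fiche-metier/" ++ code)]

def build_metiers_list (arborescence_rows : List (List (String × String))) : List (List (String × String)) :=
  PySem.List.sorted
    (arborescence_rows.foldl
      (fun (st : List (List (String × String)) × PySem.Set String) row =>
        let code := pvRowCode row
        if code = "" ∨ st.2.contains code = true then st
        else (st.1 ++ [pvMkMetier code row], st.2.add code))
      ([], PySem.Set.empty)).1
    (fun x => (List.lookup "code_rome" x).getD "") false

-- ===== PORT B =====
-- B-side helpers mirror Source B's _field / _metier / _keyed and its prev-code loop.
-- _field(row, k1, k2): first-of-two-keys lookup, stripped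
def pvBField (row : List (String × String)) (k1 k2 : String) : String :=
  PySem.Str.strip (match row.lookup k1 with
    | some v => v
    | none => (row.lookup k2).getD "")

-- _metier(code, row); 'code[:1].upper() or "?"' ported by matching on the chars
def pvBMetier (code : String) (row : List (String × String)) : List (String × String) :=
  let gdc := match code.toList with
    | [] => "?"
    | ch :: _ => String.singleton (PySem.Chars.upperChar ch)
  ("code_rome", code) ::
  ("libelle", pvBField row "libelle_rome" "libelle") ::
  ("slug", PySem.Str.replace (PySem.Str.lower code) " " "-") ::
  ("grand_domaine_code", gdc) ::
  ("grand_domaine", (pvGrandsDomaines.lookup gdc).getD "Autre") ::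
  ("domaine", pvBField row "libelle_domaine_professionnel" "libelle_domaine") ::
  ("code_domaine", pvBField row "code_domaine_professionnel" "code_domaine") ::
  ("url_rome", "https://candidat.francetravail.fr/metierscope/fiche-metier/" ++ code) :: []

-- _keyed(rows)
def pvBKeyed : List (List (String × String)) → List (String × List (String × String))
  | [] => []
  | row :: rest =>
    let code := PySem.Str.strip ((row.lookup "code_rome").getD "")
    if code.isEmpty then pvBKeyed rest else (code, row) :: pvBKeyed rest

-- the final for-loop over the sorted pairs, carrying only the previous kept code
def pvBEmit : Option String → List (String × List (String × String)) → List (List (String × String))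
  | _, [] => []
  | none, (code, row) :: rest => pvBMetier code row :: pvBEmit (some code) rest
  | some prev, (code, row) :: rest =>
      if code ≠ prev then pvBMetier code row :: pvBEmit (some code) rest
      else pvBEmit (some prev) rest

def build_metiers_list_alt (arborescence_rows : List (List (String × String))) : List (List (String × String)) :=
  pvBEmit none (PySem.List.sorted (pvBKeyed arborescence_rows) (fun p => p.1) false)

-- ===== PRECONDITION & SPEC =====
def Spec_build_metiers_list (arborescence_rows : List (List (String × String))) (out : List (List (String × String))) : Prop := out = build_metiers_list_alt arborescence_rows
instance (arborescence_rows : List (List (String × String))) (out : List (List (String × String))) : Decidable (Spec_build_metiers_list arborescence_rows out) := by unfold Spec_build_metiers_list; infer_instance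

-- ===== CLAIM (what is proved, stated in full; the proofs are below) =====
def Claim_equal_build_metiers_list : Prop := ∀ (arborescence_rows : List (List (String × String))), Dom_build_metiers_list arborescence_rows → Spec_build_metiers_list arborescence_rows (build_metiers_list arborescence_rows)

-- ===== LEMMAS AND PROOFS =====

-- the filtered (stripped code, row) pairs, as A's fold sees them
def pvPairs (rows : List (List (String × String))) : List (String × List (String × String)) :=
  rows.filterMap (fun row =>
    let code := pvRowCode row
    if code = "" then none else some (code, row))

def pvMk (p : String × List (String × String)) : List (String × String) :=
  pvMkMetier p.1 p.2

-- A's dedup: keep the first pair per code, tracked with a seen set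
def pvDedupF : List (String × List (String × String)) → PySem.Set String → List (String × List (String × String))
  | [], _ => []
  | p :: t, seen =>
      if seen.contains p.1 then pvDedupF t seen else p :: pvDedupF t (seen.add p.1)

-- B's dedup: drop pairs whose code equals the previously kept code
def pvCDedup : List (String × List (String × String)) → Option String → List (String × List (String × String))
  | [], _ => []
  | p :: t, prev =>
      if some p.1 ≠ prev then p :: pvCDedup t (some p.1) else pvCDedup t prev

-- B's helpers compute the same values as A's
theorem pvBField_eq (row : List (String × String)) (k1 k2 : String) :
    pvBField row k1 k2
      = PySem.Str.strip ((List.lookup k1 row).getD ((List.lookup k2 row).getD "")) := by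
  unfold pvBField
  cases List.lookup k1 row <;> simp

theorem pvBMetier_eq (code : String) (row : List (String × String)) :
    pvBMetier code row = pvMk (code, row) := by
  have hg : (match code.toList with
      | [] => "?"
      | ch :: _ => String.singleton (PySem.Chars.upperChar ch))
      = (if code = "" then "?"
         else String.singleton (PySem.Chars.upperChar ((PySem.Str.pyGet? code 0).getD ' '))) := by
    cases h : code.toList with
    | nil =>
      have hc : code = "" := String.toList_inj.mp (by rw [h]; rfl)
      simp [hc]
    | cons ch t =>
      have hne : code ≠ "" := by
        intro he; rw [he] at h; simp at h
      simp [hne, PySem.Str.pyGet?_eq, h]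
  unfold pvBMetier pvMk pvMkMetier
  rw [hg, pvBField_eq, pvBField_eq, pvBField_eq]

theorem pvBKeyed_eq (rows : List (List (String × String))) :
    pvBKeyed rows = pvPairs rows := by
  induction rows with
  | nil => rfl
  | cons row t ih =>
    rw [pvBKeyed]
    by_cases h : pvRowCode row = ""
    · rw [if_pos (by simp [show PySem.Str.strip ((row.lookup "code_rome").getD "") = pvRowCode row from rfl, h]), ih]
      exact (by simp [pvPairs, h] : pvPairs (row :: t) = pvPairs t).symm
    · rw [if_neg (by simp [show PySem.Str.strip ((row.lookup "code_rome").getD "") = pvRowCode row from rfl, h]), ih]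
      exact (by simp [pvPairs, h] : pvPairs (row :: t) = (pvRowCode row, row) :: pvPairs t).symm

theorem pvBEmit_eq (l : List (String × List (String × String))) (prev : Option String) :
    pvBEmit prev l = (pvCDedup l prev).map pvMk := by
  induction l generalizing prev with
  | nil => cases prev <;> rfl
  | cons p t ih =>
    obtain ⟨c, r⟩ := p
    cases prev with
    | none =>
      rw [pvBEmit, pvCDedup, if_pos (by simp)]
      simp [ih, pvBMetier_eq]
    | some q =>
      rw [pvBEmit, pvCDedup]
      by_cases h : c = q
      · rw [if_neg (by simp [h]), if_neg (by simp [h]), ih]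
      · rw [if_pos (by simp [h]), if_pos (by simp [h])]
        simp [ih, pvBMetier_eq]

-- A's fold produces exactly pvDedupF over the filtered pairs
theorem pvA1 (rows : List (List (String × String)))
    (acc : List (List (String × String))) (seen : PySem.Set String) :
    (rows.foldl
      (fun (st : List (List (String × String)) × PySem.Set String) row =>
        let code := pvRowCode row
        if code = "" ∨ st.2.contains code = true then st
        else (st.1 ++ [pvMkMetier code row], st.2.add code))
      (acc, seen)).1 = acc ++ (pvDedupF (pvPairs rows) seen).map pvMk := by
  induction rows generalizing acc seen with
  | nil => simp [pvPairs, pvDedupF]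
  | cons row t ih =>
    simp only [List.foldl_cons]
    by_cases h1 : pvRowCode row = ""
    · rw [if_pos (Or.inl h1), ih]
      have hp : pvPairs (row :: t) = pvPairs t := by simp [pvPairs, h1]
      rw [hp]
    · by_cases h2 : seen.contains (pvRowCode row) = true
      · rw [if_pos (Or.inr h2), ih]
        have hp : pvPairs (row :: t) = (pvRowCode row, row) :: pvPairs t := by
          simp [pvPairs, h1]
        rw [hp, pvDedupF, if_pos h2]
      · rw [if_neg (by tauto), ih]
        have hp : pvPairs (row :: t) = (pvRowCode row, row) :: pvPairs t := by
          simp [pvPairs, h1]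
        rw [hp, pvDedupF, if_neg h2]
        simp [pvMk]

-- membership in pvDedupF = "first pair in the list with this code, code unseen"
theorem pvMemDedupF (pairs : List (String × List (String × String)))
    (seen : PySem.Set String) (x : String × List (String × String)) :
    x ∈ pvDedupF pairs seen ↔
      seen.contains x.1 = false ∧ pairs.find? (fun y => y.1 == x.1) = some x := by
  induction pairs generalizing seen with
  | nil => simp [pvDedupF]
  | cons p t ih =>
    rw [pvDedupF]
    by_cases h : seen.contains p.1
    · rw [if_pos h, ih]
      constructor
      · rintro ⟨hx, hf⟩
        have hpx : (p.1 == x.1) = false := by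
          rw [beq_eq_false_iff_ne]
          intro he; rw [he] at h; rw [h] at hx; simp at hx
        exact ⟨hx, by rw [List.find?_cons_of_neg (by simp [hpx]), hf]⟩
      · rintro ⟨hx, hf⟩
        have hpx : (p.1 == x.1) = false := by
          rw [beq_eq_false_iff_ne]
          intro he; rw [he] at h; rw [h] at hx; simp at hx
        rw [List.find?_cons_of_neg (by simp [hpx])] at hf
        exact ⟨hx, hf⟩
    · rw [if_neg h, List.mem_cons, ih]
      have hc : seen.contains p.1 = false := Bool.not_eq_true _ ▸ Bool.eq_false_iff.mpr h
      constructor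
      · rintro (rfl | ⟨hx, hf⟩)
        · exact ⟨hc, by rw [List.find?_cons_of_pos (by simp)]⟩
        · have hmem : x.1 ∉ seen.add p.1 := by
            intro hm
            rw [← PySem.Set.contains_iff] at hm
            rw [hm] at hx; simp at hx
          rw [PySem.Set.mem_add] at hmem
          rw [not_or] at hmem
          have hxs : seen.contains x.1 = false := by
            rw [Bool.eq_false_iff]; intro hcx
            exact hmem.1 ((PySem.Set.contains_iff _ _).mp hcx)
          have hpx : (p.1 == x.1) = false := by
            rw [beq_eq_false_iff_ne]; exact fun he => hmem.2 he.symm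
          exact ⟨hxs, by rw [List.find?_cons_of_neg (by simp [hpx]), hf]⟩
      · rintro ⟨hx, hf⟩
        rcases hq : (p.1 == x.1) with _ | _
        · right
          rw [List.find?_cons_of_neg (by simp [hq])] at hf
          refine ⟨?_, hf⟩
          rw [Bool.eq_false_iff]; intro hcx
          rw [PySem.Set.contains_iff, PySem.Set.mem_add] at hcx
          rcases hcx with hm | he
          · rw [(PySem.Set.contains_iff _ _).mpr hm] at hx
            simp at hx
          · rw [beq_eq_false_iff_ne] at hq; exact hq he.symm
        · left
          rw [List.find?_cons_of_pos (by simp [hq])] at hf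
          exact (Option.some_inj.mp hf).symm

-- keys kept by pvDedupF are pairwise distinct
theorem pvDedupFPairwiseNe (pairs : List (String × List (String × String)))
    (seen : PySem.Set String) :
    (pvDedupF pairs seen).Pairwise (fun a b => a.1 ≠ b.1) := by
  induction pairs generalizing seen with
  | nil => simp [pvDedupF]
  | cons p t ih =>
    rw [pvDedupF]
    by_cases h : seen.contains p.1
    · rw [if_pos h]; exact ih seen
    · rw [if_neg h]
      refine List.Pairwise.cons ?_ (ih _)
      intro z hz
      have hzf := ((pvMemDedupF t (seen.add p.1) z).mp hz).1
      intro he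
      have : z.1 ∈ seen.add p.1 := (PySem.Set.mem_add _ _ _).mpr (Or.inr he.symm)
      rw [← PySem.Set.contains_iff] at this
      rw [this] at hzf
      simp at hzf

-- membership in pvCDedup on a key-sorted list = "first pair with this code"
theorem pvMemCDedup (l : List (String × List (String × String))) (prev : Option String)
    (hs : l.Pairwise (fun a b => a.1 ≤ b.1))
    (hp : ∀ c, prev = some c → ∀ y ∈ l, c ≤ y.1)
    (x : String × List (String × String)) :
    x ∈ pvCDedup l prev ↔
      some x.1 ≠ prev ∧ l.find? (fun y => y.1 == x.1) = some x := by
  induction l generalizing prev with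
  | nil => simp [pvCDedup]
  | cons p t ih =>
    obtain ⟨hhead, hs'⟩ := List.pairwise_cons.mp hs
    rw [pvCDedup]
    by_cases h : some p.1 ≠ prev
    · rw [if_pos h, List.mem_cons,
         ih (some p.1) hs' (fun c hc y hy => Option.some.inj hc ▸ hhead y hy)]
      constructor
      · rintro (rfl | ⟨hne, hf⟩)
        · exact ⟨h, by rw [List.find?_cons_of_pos (by simp)]⟩
        · have hxt : x ∈ t := List.mem_of_find?_eq_some hf
          have hpx : x.1 ≠ p.1 := fun he => hne (by rw [he])
          refine ⟨?_, by rw [List.find?_cons_of_neg (by simpa using Ne.symm hpx), hf]⟩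
          rcases prev with _ | c
          · simp
          · have hcp : c ≤ p.1 := hp c rfl p (List.mem_cons_self ..)
            have hcnep : c ≠ p.1 := fun he => h (by rw [he])
            have h2 : p.1 ≤ x.1 := hhead x hxt
            intro he
            exact hcnep (le_antisymm hcp (h2.trans (le_of_eq (Option.some.inj he))))
      · rintro ⟨hne, hf⟩
        rcases hq : (p.1 == x.1) with _ | _
        · right
          rw [List.find?_cons_of_neg (by simp [hq])] at hf
          rw [beq_eq_false_iff_ne] at hq
          exact ⟨by simpa using fun he => hq he.symm, hf⟩
        · left
          rw [List.find?_cons_of_pos (by simp [hq])] at hf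
          exact (Option.some_inj.mp hf).symm
    · replace h := not_not.mp h
      rw [if_neg (by simp [h]),
         ih prev hs' (fun c hc y hy => by
           rw [← h] at hc; exact Option.some.inj hc ▸ hhead y hy)]
      have hiff : ∀ hne : some x.1 ≠ prev,
          (t.find? (fun y => y.1 == x.1) = some x ↔
           (p :: t).find? (fun y => y.1 == x.1) = some x) := by
        intro hne
        have hpx : (p.1 == x.1) = false := by
          rw [beq_eq_false_iff_ne]
          intro he; exact hne (by rw [← he, h])
        rw [List.find?_cons_of_neg (by simp [hpx])]
      constructor
      · rintro ⟨hne, hf⟩; exact ⟨hne, (hiff hne).mp hf⟩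
      · rintro ⟨hne, hf⟩; exact ⟨hne, (hiff hne).mpr hf⟩

-- keys kept by pvCDedup on a key-sorted list strictly increase
theorem pvCDedupPairwiseLt (l : List (String × List (String × String))) (prev : Option String)
    (hs : l.Pairwise (fun a b => a.1 ≤ b.1))
    (hp : ∀ c, prev = some c → ∀ y ∈ l, c ≤ y.1) :
    (pvCDedup l prev).Pairwise (fun a b => a.1 < b.1) := by
  induction l generalizing prev with
  | nil => simp [pvCDedup]
  | cons p t ih =>
    obtain ⟨hhead, hs'⟩ := List.pairwise_cons.mp hs
    rw [pvCDedup]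
    by_cases h : some p.1 ≠ prev
    · rw [if_pos h]
      refine List.Pairwise.cons ?_
        (ih (some p.1) hs' (fun c hc y hy => Option.some.inj hc ▸ hhead y hy))
      intro z hz
      obtain ⟨hzne, hzf⟩ := (pvMemCDedup t (some p.1) hs'
        (fun c hc y hy => Option.some.inj hc ▸ hhead y hy) z).mp hz
      have hzt : z ∈ t := List.mem_of_find?_eq_some hzf
      exact lt_of_le_of_ne (hhead z hzt) (fun he => hzne (by rw [← he]))
    · replace h := not_not.mp h
      rw [if_neg (by simp [h])]
      exact ih prev hs' (fun c hc y hy => by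
        rw [← h] at hc; exact Option.some.inj hc ▸ hhead y hy)

-- inserting a non-matching element does not change a filter
theorem pvFilterInsertOfNe {α : Type} (b : α → α → Bool) (p : α → Bool) (x : α)
    (l : List α) (hx : p x = false) :
    (PySem.List.insertBy b x l).filter p = l.filter p := by
  induction l with
  | nil => simp [PySem.List.insertBy, hx]
  | cons y ys ih =>
    rw [PySem.List.insertBy]
    by_cases hb : b x y
    · rw [if_pos hb, List.filter_cons, hx]
      simp
    · rw [if_neg hb, List.filter_cons, List.filter_cons, ih]

-- stable insertion puts x after every element with its key
theorem pvFilterInsertOfEq (x : String × List (String × String))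
    (l : List (String × List (String × String))) (c : String)
    (hs : l.Pairwise (fun a b => a.1 ≤ b.1)) (hx : x.1 = c) :
    (PySem.List.insertBy (fun a b => decide (a.1 < b.1)) x l).filter (fun y => y.1 == c)
      = l.filter (fun y => y.1 == c) ++ [x] := by
  induction l with
  | nil => simp [PySem.List.insertBy, hx]
  | cons y ys ih =>
    obtain ⟨hhead, hs'⟩ := List.pairwise_cons.mp hs
    rw [PySem.List.insertBy]
    by_cases hb : x.1 < y.1
    · rw [if_pos (by simpa using hb)]
      have hnil : (y :: ys).filter (fun z => z.1 == c) = [] := by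
        rw [List.filter_eq_nil_iff]
        intro z hz
        have hyz : y.1 ≤ z.1 := by
          rcases List.mem_cons.mp hz with rfl | hzys
          · exact le_refl _
          · exact hhead z hzys
        simp only [beq_iff_eq]
        intro he
        exact absurd (he ▸ (hb.trans_le hyz)) (by rw [← hx]; exact lt_irrefl _)
      rw [hnil, List.filter_cons]
      simp [hx, hnil]
    · rw [if_neg (by simpa using hb), List.filter_cons, List.filter_cons, ih hs']
      by_cases hy : (y.1 == c) = true
      · simp [hy]
      · simp [Bool.eq_false_iff.mpr hy]

-- STABILITY of PySem.List.sorted, as a filter statement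
theorem pvFilterSorted (xs : List (String × List (String × String))) (c : String) :
    (PySem.List.sorted xs (fun p => p.1) false).filter (fun y => y.1 == c)
      = xs.filter (fun y => y.1 == c) := by
  induction xs using List.reverseRecOn with
  | nil => rfl
  | append_singleton l x ih =>
    have h1 : PySem.List.sorted (l ++ [x]) (fun p => p.1) false
        = PySem.List.insertBy (fun a b => decide (a.1 < b.1)) x
            (PySem.List.sorted l (fun p => p.1) false) := by
      rw [PySem.List.sorted_eq_foldl_insertBy, PySem.List.sorted_eq_foldl_insertBy,
        List.foldl_append, List.foldl_cons, List.foldl_nil]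
    rw [h1]
    by_cases hx : x.1 = c
    · rw [pvFilterInsertOfEq x _ c (PySem.List.sorted_pairwise l _) hx, ih,
        List.filter_append]
      simp [hx]
    · rw [pvFilterInsertOfNe _ _ _ _ (by simp [hx]), ih, List.filter_append]
      simp [hx]

-- find? is the head of the filter
theorem pvFindEqHeadFilter {α : Type} (l : List α) (p : α → Bool) :
    l.find? p = (l.filter p).head? := by
  induction l with
  | nil => rfl
  | cons a t ih =>
    rw [List.find?_cons, List.filter_cons]
    by_cases h : p a
    · simp [h]
    · simp only [h]
      simpa [h] using ih

-- the sort key of a built metier dict is its code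
theorem pvKeyMk (p : String × List (String × String)) :
    (List.lookup "code_rome" (pvMk p)).getD "" = p.1 := by
  simp [pvMk, pvMkMetier]

-- the two dedups agree up to permutation
theorem pvPermDedup (pairs : List (String × List (String × String))) :
    (pvCDedup (PySem.List.sorted pairs (fun p => p.1) false) none).Perm
      (pvDedupF pairs PySem.Set.empty) := by
  have hnC : (pvCDedup (PySem.List.sorted pairs (fun p => p.1) false) none).Nodup :=
    (pvCDedupPairwiseLt _ none (PySem.List.sorted_pairwise _ _) (by simp)).imp
      (fun h => fun he => absurd (he ▸ h) (lt_irrefl _))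
  have hnD : (pvDedupF pairs PySem.Set.empty).Nodup :=
    (pvDedupFPairwiseNe pairs PySem.Set.empty).imp
      (fun h => fun he => h (he ▸ rfl))
  rw [List.perm_ext_iff_of_nodup hnC hnD]
  intro x
  rw [pvMemCDedup _ none (PySem.List.sorted_pairwise _ _) (by simp) x,
    pvMemDedupF]
  have hfind : (PySem.List.sorted pairs (fun p => p.1) false).find?
      (fun y => y.1 == x.1) = pairs.find? (fun y => y.1 == x.1) := by
    rw [pvFindEqHeadFilter, pvFindEqHeadFilter, pvFilterSorted]
  have hemp : (PySem.Set.empty : PySem.Set String).contains x.1 = false := by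
    rw [Bool.eq_false_iff]
    intro hc
    simp [PySem.Set.empty] at hc
  rw [hfind, hemp]
  simp

theorem pvMain (rows : List (List (String × String))) :
    build_metiers_list rows = build_metiers_list_alt rows := by
  unfold build_metiers_list build_metiers_list_alt
  rw [pvA1 rows [] PySem.Set.empty, pvBKeyed_eq, pvBEmit_eq]
  simp only [List.nil_append]
  apply PySem.List.sorted_eq_of_perm_of_pairwise_lt
  · exact List.Perm.map pvMk (pvPermDedup (pvPairs rows))
  · rw [List.pairwise_map]
    refine (pvCDedupPairwiseLt _ none (PySem.List.sorted_pairwise _ _) (by simp)).imp ?_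
    intro a b h
    rw [pvKeyMk, pvKeyMk]
    exact h

-- ===== VERDICT (by name: the statement is the Claim_ definition above) =====
theorem build_metiers_list_spec : Claim_equal_build_metiers_list := by
  intro rows _
  unfold Spec_build_metiers_list
  exact pvMain rows
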